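-- pv_equiv track=rewrite | github.com/rnepal2/Euler-Project-Problems | ProjectEuler/Problem3.py | Any_Factors
-- ===== SOURCE A (Python) =====
-- def Any_Factors(n):
--     list_to_search = []
--     for i in range(1, n):
--         if i % 2 == 0: continue
--         if i % 3 == 0: continue
--         if i % 5 == 0: continue
--         if i % 7 == 0: continue
--         if i % 11 == 0: continue
--         if i % 17 == 0: continue
--         list_to_search.append(i)
--
--     list_factors = []
--     for i in list_to_search:
--         if n % i == 0:
--             list_factors.append(i)
--     return list_factors
-- ===== SOURCE B (Python) =====
-- def Any_Factors(n):
--     divs = set()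
--     i = 1
--     while i * i <= n:
--         if n % i == 0:
--             divs.add(i)
--             divs.add(n // i)
--         i += 1
--     bad = (2, 3, 5, 7, 11, 17)
--     return sorted(d for d in divs if d < n and all(d % p for p in bad))
-- ===== Notes on version B (the rewrite author's own statement) =====
-- stated objective: faster
-- what changed: B replaces A's full scan of range(1,n) with trial division up to sqrt(n) collecting divisor pairs into a set, then filters and sorts them.
import Mathlib
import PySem

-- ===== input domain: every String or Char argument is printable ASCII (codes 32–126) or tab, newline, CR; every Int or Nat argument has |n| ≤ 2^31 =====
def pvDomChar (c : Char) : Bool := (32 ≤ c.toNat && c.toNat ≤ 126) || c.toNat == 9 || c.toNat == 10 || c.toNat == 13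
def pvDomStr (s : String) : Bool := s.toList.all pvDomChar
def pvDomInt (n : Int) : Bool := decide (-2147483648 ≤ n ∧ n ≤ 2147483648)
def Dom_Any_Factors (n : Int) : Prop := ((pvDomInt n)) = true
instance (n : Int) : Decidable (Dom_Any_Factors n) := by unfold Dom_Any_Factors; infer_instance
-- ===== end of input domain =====

-- B replaces A's scan of the whole range(1, n) by trial division up to √n collecting
-- divisor pairs into a set, then filtering and sorting (objective: faster).

-- ===== PORT A =====
def Any_Factors (n : Int) : List Int :=
  let list_to_search : List Int :=
    (PySem.List.pyRange 1 n 1).foldl (fun acc i =>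
      if PySem.Int.mod i 2 = 0 then acc
      else if PySem.Int.mod i 3 = 0 then acc
      else if PySem.Int.mod i 5 = 0 then acc
      else if PySem.Int.mod i 7 = 0 then acc
      else if PySem.Int.mod i 11 = 0 then acc
      else if PySem.Int.mod i 17 = 0 then acc
      else acc ++ [i]) []
  list_to_search.foldl (fun acc i =>
      if PySem.Int.mod n i = 0 then acc ++ [i] else acc) []

-- ===== PORT B =====
-- the while-loop 'while i*i <= n: … i += 1' of Source B
def pvCollect (n : Int) (i : Int) (s : PySem.Set Int) : PySem.Set Int :=
  if i * i ≤ n then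
    pvCollect n (i + 1)
      (if PySem.Int.mod n i = 0 then
         PySem.Set.add (PySem.Set.add s i) (PySem.Int.floordiv n i)
       else s)
  else s
termination_by (n + 1 - i).toNat
decreasing_by
  rename_i h
  have h2 : 2 * i ≤ n + 1 := by nlinarith [mul_self_nonneg (i - 1)]
  have h0 : 0 ≤ n := le_trans (mul_self_nonneg i) h
  omega

def Any_Factors_alt (n : Int) : List Int :=
  let divs : PySem.Set Int := pvCollect n 1 PySem.Set.empty
  PySem.List.sorted
    (divs.filter (fun d =>
      decide (d < n) &&
      ([2, 3, 5, 7, 11, 17] : List Int).all (fun p => !decide (PySem.Int.mod d p = 0))))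
    (fun x => x) false

-- ===== PRECONDITION & SPEC =====
def Spec_Any_Factors (n : Int) (out : List Int) : Prop := out = Any_Factors_alt n
instance (n : Int) (out : List Int) : Decidable (Spec_Any_Factors n out) := by unfold Spec_Any_Factors; infer_instance

-- ===== CLAIM (what is proved, stated in full; the proofs are below) =====
def Claim_equal_Any_Factors : Prop := ∀ (n : Int), Dom_Any_Factors n → Spec_Any_Factors n (Any_Factors n)

-- ===== LEMMAS AND PROOFS =====

-- the residue tests A applies (and B applies through its 'all')
def pvGood (x : Int) : Bool :=
  !(PySem.Int.mod x 2 == 0) && !(PySem.Int.mod x 3 == 0) && !(PySem.Int.mod x 5 == 0) &&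
  !(PySem.Int.mod x 7 == 0) && !(PySem.Int.mod x 11 == 0) && !(PySem.Int.mod x 17 == 0)

lemma pvGood_iff (x : Int) : pvGood x = true ↔
    (¬ PySem.Int.mod x 2 = 0 ∧ ¬ PySem.Int.mod x 3 = 0 ∧ ¬ PySem.Int.mod x 5 = 0 ∧
     ¬ PySem.Int.mod x 7 = 0 ∧ ¬ PySem.Int.mod x 11 = 0 ∧ ¬ PySem.Int.mod x 17 = 0) := by
  simp [pvGood, and_assoc]

-- A's chain of 'continue' tests is the single test pvGood
lemma pvIf_eq (acc : List Int) (x : Int) :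
    (if PySem.Int.mod x 2 = 0 then acc
      else if PySem.Int.mod x 3 = 0 then acc
      else if PySem.Int.mod x 5 = 0 then acc
      else if PySem.Int.mod x 7 = 0 then acc
      else if PySem.Int.mod x 11 = 0 then acc
      else if PySem.Int.mod x 17 = 0 then acc
      else acc ++ [x]) = if pvGood x then acc ++ [x] else acc := by
  by_cases hg : pvGood x = true
  · obtain ⟨a,b,c,d,e,f⟩ := (pvGood_iff x).mp hg
    rw [if_neg a, if_neg b, if_neg c, if_neg d, if_neg e, if_neg f]
    exact (if_pos hg).symm
  · rw [if_neg hg]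
    rw [pvGood_iff] at hg
    by_cases h2 : PySem.Int.mod x 2 = 0
    · rw [if_pos h2]
    rw [if_neg h2]
    by_cases h3 : PySem.Int.mod x 3 = 0
    · rw [if_pos h3]
    rw [if_neg h3]
    by_cases h5 : PySem.Int.mod x 5 = 0
    · rw [if_pos h5]
    rw [if_neg h5]
    by_cases h7 : PySem.Int.mod x 7 = 0
    · rw [if_pos h7]
    rw [if_neg h7]
    by_cases h11 : PySem.Int.mod x 11 = 0
    · rw [if_pos h11]
    rw [if_neg h11]
    rw [if_pos (by tauto : PySem.Int.mod x 17 = 0)]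

-- A's result is a double filter of the range
lemma pvA_eq (n : Int) :
    Any_Factors n =
      (((PySem.List.pyRange 1 n 1).filter (fun i => pvGood i)).filter
        (fun i => decide (PySem.Int.mod n i = 0))) := by
  simp only [Any_Factors]
  rw [PySem.List.foldl_congr_mem _ _ (fun acc i => if pvGood i then acc ++ [i] else acc) _
      (fun acc x _ => pvIf_eq acc x)]
  rw [PySem.List.foldl_append_if_eq_filter, PySem.List.foldl_append_ite_eq_filter]
  simp

-- membership in the collecting loop
lemma pvMem_collect (n i : Int) (s : PySem.Set Int) :
    1 ≤ i → ∀ x, (x ∈ pvCollect n i s ↔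
      x ∈ s ∨ ∃ j, i ≤ j ∧ j * j ≤ n ∧ PySem.Int.mod n j = 0 ∧
        (x = j ∨ x = PySem.Int.floordiv n j)) := by
  induction i, s using pvCollect.induct n with
  | case1 i s hle ih =>
    intro hi x
    rw [pvCollect, if_pos hle]
    rw [dite_eq_ite] at ih
    rw [ih (by omega) x]
    by_cases hm : PySem.Int.mod n i = 0
    · simp only [if_pos hm, PySem.Set.mem_add]
      constructor
      · rintro (((hx | rfl) | rfl) | ⟨j, hj1, hj2, hj3, hj4⟩)
        · exact Or.inl hx
        · exact Or.inr ⟨x, le_refl x, hle, hm, Or.inl rfl⟩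
        · exact Or.inr ⟨i, le_refl i, hle, hm, Or.inr rfl⟩
        · exact Or.inr ⟨j, by omega, hj2, hj3, hj4⟩
      · rintro (hx | ⟨j, hj1, hj2, hj3, hj4⟩)
        · exact Or.inl (Or.inl (Or.inl hx))
        · rcases eq_or_lt_of_le hj1 with rfl | hlt
          · rcases hj4 with rfl | rfl
            · exact Or.inl (Or.inl (Or.inr rfl))
            · exact Or.inl (Or.inr rfl)
          · exact Or.inr ⟨j, by omega, hj2, hj3, hj4⟩
    · simp only [if_neg hm]
      constructor
      · rintro (hx | ⟨j, hj1, hj2, hj3, hj4⟩)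
        · exact Or.inl hx
        · exact Or.inr ⟨j, by omega, hj2, hj3, hj4⟩
      · rintro (hx | ⟨j, hj1, hj2, hj3, hj4⟩)
        · exact Or.inl hx
        · rcases eq_or_lt_of_le hj1 with rfl | hlt
          · exact absurd hj3 hm
          · exact Or.inr ⟨j, by omega, hj2, hj3, hj4⟩
  | case2 i s hle =>
    intro hi x
    rw [pvCollect, if_neg hle]
    constructor
    · exact Or.inl
    · rintro (hx | ⟨j, hj1, hj2, hj3, hj4⟩)
      · exact hx
      · exact absurd hj2 (by rw [not_le] at hle ⊢; nlinarith)

lemma pvNodup_collect (n i : Int) (s : PySem.Set Int) :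
    s.Nodup → (pvCollect n i s).Nodup := by
  induction i, s using pvCollect.induct n with
  | case1 i s hle ih =>
    intro hs
    rw [pvCollect, if_pos hle]
    rw [dite_eq_ite] at ih
    apply ih
    by_cases hm : PySem.Int.mod n i = 0
    · simp only [if_pos hm]
      exact PySem.Set.nodup_add _ _ (PySem.Set.nodup_add _ _ hs)
    · simpa only [if_neg hm] using hs
  | case2 i s hle =>
    intro hs
    rwa [pvCollect, if_neg hle]

-- the collected set is exactly the positive divisors of n (all ≤ n)
lemma pvMem_divs (n x : Int) :
    x ∈ pvCollect n 1 PySem.Set.empty ↔ 1 ≤ x ∧ x ≤ n ∧ x ∣ n := by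
  rw [pvMem_collect n 1 PySem.Set.empty le_rfl x]
  constructor
  · rintro (hx | ⟨j, hj1, hj2, hj3, hj4⟩)
    · exact absurd hx (List.not_mem_nil)
    · have hjdvd : j ∣ n := (PySem.Int.mod_eq_zero_iff_dvd n j).mp hj3
      have hn1 : 1 ≤ n := le_trans (by nlinarith) hj2
      rcases hj4 with rfl | rfl
      · exact ⟨hj1, by nlinarith, hjdvd⟩
      · obtain ⟨c, rfl⟩ := hjdvd
        rw [PySem.Int.floordiv_eq_ediv_of_pos (by omega : (0:Int) < j),
            Int.mul_ediv_cancel_left c (by omega : j ≠ 0)]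
        have hc1 : 1 ≤ c := by nlinarith
        exact ⟨hc1, by nlinarith, dvd_mul_left c j⟩
  · rintro ⟨hx1, hxn, hdvd⟩
    right
    obtain ⟨c, rfl⟩ := hdvd
    have hc1 : 1 ≤ c := by nlinarith
    by_cases hxx : x * x ≤ x * c
    · exact ⟨x, hx1, hxx,
        (PySem.Int.mod_eq_zero_iff_dvd _ x).mpr (Dvd.intro c rfl), Or.inl rfl⟩
    · refine ⟨c, hc1, by nlinarith, (PySem.Int.mod_eq_zero_iff_dvd _ c).mpr (dvd_mul_left c x),
        Or.inr ?_⟩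
      rw [PySem.Int.floordiv_eq_ediv_of_pos (by omega : (0:Int) < c),
          Int.mul_ediv_cancel x (by omega : c ≠ 0)]

theorem Any_Factors_equiv (n : Int) : Any_Factors n = Any_Factors_alt n := by
  rw [pvA_eq]
  simp only [Any_Factors_alt]
  have hpair : (((PySem.List.pyRange 1 n 1).filter (fun i => pvGood i)).filter
      (fun i => decide (PySem.Int.mod n i = 0))).Pairwise (· < ·) :=
    ((PySem.List.pairwise_lt_pyRange_one 1 n).filter _).filter _
  have hnodupL := hpair.imp (fun h => ne_of_lt h)
  have hnodupB : ((pvCollect n 1 PySem.Set.empty).filter (fun d =>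
      decide (d < n) &&
      ([2, 3, 5, 7, 11, 17] : List Int).all (fun p => !decide (PySem.Int.mod d p = 0)))).Nodup :=
    (pvNodup_collect n 1 PySem.Set.empty List.nodup_nil).filter _
  have hmem : ∀ a : Int,
      a ∈ (((PySem.List.pyRange 1 n 1).filter (fun i => pvGood i)).filter
        (fun i => decide (PySem.Int.mod n i = 0))) ↔
      a ∈ ((pvCollect n 1 PySem.Set.empty).filter (fun d =>
        decide (d < n) &&
        ([2, 3, 5, 7, 11, 17] : List Int).all (fun p => !decide (PySem.Int.mod d p = 0)))) := by
    intro a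
    simp only [List.mem_filter, PySem.List.mem_pyRange_one, pvMem_divs, decide_eq_true_eq,
      List.all_cons, List.all_nil, Bool.and_true, Bool.and_eq_true, Bool.not_eq_true',
      decide_eq_false_iff_not, pvGood_iff]
    constructor
    · rintro ⟨⟨⟨h1, h2⟩, hg⟩, hm⟩
      exact ⟨⟨h1, le_of_lt h2, (PySem.Int.mod_eq_zero_iff_dvd n a).mp hm⟩, h2,
        hg.1, hg.2.1, hg.2.2.1, hg.2.2.2.1, hg.2.2.2.2.1, hg.2.2.2.2.2⟩
    · rintro ⟨⟨h1, hle, hdvd⟩, h2, g1, g2, g3, g4, g5, g6⟩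
      exact ⟨⟨⟨h1, h2⟩, g1, g2, g3, g4, g5, g6⟩,
        (PySem.Int.mod_eq_zero_iff_dvd n a).mpr hdvd⟩
  have hperm := (List.perm_ext_iff_of_nodup hnodupL hnodupB).mpr hmem
  exact (PySem.List.sorted_eq_of_perm_of_pairwise_lt _ _ (fun x => x) hperm hpair).symm

-- ===== VERDICT (by name: the statement is the Claim_ definition above) =====
theorem Any_Factors_spec : Claim_equal_Any_Factors := by
  intro n _
  unfold Spec_Any_Factors
  exact Any_Factors_equiv n
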